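-- pv_equiv track=rewrite | github.com/Otavio867/estudos.py | pyt/impar.py | tres_impares_consecutivos
-- ===== SOURCE A (Python) =====
-- def tres_impares_consecutivos(array):
--     count=0
--     for num in array:
--         if num%2==1:
--             count+=1
--         else:
--             count=0
--         if count>2:
--             return True
--     return False
-- ===== SOURCE B (Python) =====
-- def tres_impares_consecutivos(array):
--     it = iter(array)
--     for x in it:
--         if x % 2 == 1:
--             run = 1
--             for y in it:
--                 if y % 2 != 1:
--                     break
--                 run += 1
--             if run >= 3:
--                 return True
--     return False
-- ===== Notes on version B (the rewrite author's own statement) =====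
-- stated objective: alternative
-- what changed: Instead of one pass maintaining a reset counter, B consumes each maximal run of consecutive odd numbers with an inner loop over the shared iterator and checks the run's length against 3.
import Mathlib
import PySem

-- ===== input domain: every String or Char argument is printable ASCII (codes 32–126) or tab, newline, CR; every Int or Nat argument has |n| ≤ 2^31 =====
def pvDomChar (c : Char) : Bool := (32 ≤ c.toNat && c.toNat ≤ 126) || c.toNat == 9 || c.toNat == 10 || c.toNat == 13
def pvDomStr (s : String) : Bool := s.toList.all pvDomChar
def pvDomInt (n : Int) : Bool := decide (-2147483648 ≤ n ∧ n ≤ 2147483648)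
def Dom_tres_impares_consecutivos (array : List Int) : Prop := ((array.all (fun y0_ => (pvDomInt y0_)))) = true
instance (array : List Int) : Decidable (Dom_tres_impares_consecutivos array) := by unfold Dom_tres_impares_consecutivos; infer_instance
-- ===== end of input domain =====

-- B replaces A's reset-counter single pass by a run-splitting scan: it consumes each
-- maximal run of consecutive odds and compares the run length with 3 (alternative, same cost).

-- ===== PORT A =====
-- the for-loop of A with its counter and early return
def pvALoop : List Int → Int → Bool
  | [], _ => false
  | num :: rest, count =>
      let count' := if PySem.Int.mod num 2 = 1 then count + 1 else 0
      if count' > 2 then true else pvALoop rest count'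

def tres_impares_consecutivos (array : List Int) : Bool := pvALoop array 0

-- ===== PORT B =====
-- B's inner for-loop: consume the rest of the current odd run from the shared iterator;
-- returns the final run length and the remaining elements of the iterator.
def pvBSkip : List Int → Int → Int × List Int
  | [], run => (run, [])
  | y :: ys, run =>
      if PySem.Int.mod y 2 ≠ 1 then (run, ys) else pvBSkip ys (run + 1)

-- needed by pvBMain's termination; stated before the port so it can cite it by name
theorem pvBSkip_len_le : ∀ (xs : List Int) (run : Int), (pvBSkip xs run).2.length ≤ xs.length := by
  intro xs
  induction xs with
  | nil => intro run; simp [pvBSkip]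
  | cons y ys ih =>
      intro run
      simp only [pvBSkip]
      split
      · simp
      · exact le_trans (ih (run + 1)) (Nat.le_succ _)

-- B's outer for-loop over the shared iterator
def pvBMain (xs : List Int) : Bool :=
  match xs with
  | [] => false
  | x :: rest =>
      if PySem.Int.mod x 2 = 1 then
        let p := pvBSkip rest 1
        if p.1 ≥ 3 then true else pvBMain p.2
      else pvBMain rest
termination_by xs.length
decreasing_by
  · exact Nat.lt_succ_of_le (pvBSkip_len_le rest 1)
  · simp

def tres_impares_consecutivos_alt (array : List Int) : Bool := pvBMain array

-- ===== PRECONDITION & SPEC =====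
def Spec_tres_impares_consecutivos (array : List Int) (out : Bool) : Prop := out = tres_impares_consecutivos_alt array
instance (array : List Int) (out : Bool) : Decidable (Spec_tres_impares_consecutivos array out) := by unfold Spec_tres_impares_consecutivos; infer_instance

-- ===== CLAIM (what is proved, stated in full; the proofs are below) =====
def Claim_equal_tres_impares_consecutivos : Prop := ∀ (array : List Int), Dom_tres_impares_consecutivos array → Spec_tres_impares_consecutivos array (tres_impares_consecutivos array)

-- ===== LEMMAS AND PROOFS =====

-- the run length pvBSkip reports never drops below its starting value
theorem pvBSkip_fst_ge : ∀ (xs : List Int) (run : Int), run ≤ (pvBSkip xs run).1 := by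
  intro xs
  induction xs with
  | nil => intro run; simp [pvBSkip]
  | cons y ys ih =>
      intro run
      simp only [pvBSkip]
      split
      · simp
      · exact le_trans (by omega) (ih (run + 1))

-- main invariant, by strong induction on the list length:
-- (1) A's loop started fresh equals B's outer loop;
-- (2) inside an odd run with current count k ∈ {1,2}, A's loop equals
--     "consume the run, compare with 3, continue" as B does.
theorem pvAB_key : ∀ (n : Nat) (xs : List Int), xs.length ≤ n →
    (pvALoop xs 0 = pvBMain xs ∧
     ∀ (k : Int), 1 ≤ k → k ≤ 2 →
       pvALoop xs k = (if (pvBSkip xs k).1 ≥ 3 then true else pvBMain (pvBSkip xs k).2)) := by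
  intro n
  induction n with
  | zero =>
      intro xs hlen
      have hx : xs = [] := List.eq_nil_of_length_eq_zero (Nat.le_zero.mp hlen)
      subst hx
      refine ⟨by simp [pvALoop, pvBMain], ?_⟩
      intro k h1 h2
      simp only [pvALoop, pvBSkip, pvBMain]
      have : ¬ ((3:Int) ≤ k) := by omega
      simp [this]
  | succ n ih =>
      intro xs hlen
      match xs with
      | [] =>
          refine ⟨by simp [pvALoop, pvBMain], ?_⟩
          intro k h1 h2
          simp only [pvALoop, pvBSkip, pvBMain]
          have : ¬ ((3:Int) ≤ k) := by omega
          simp [this]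
      | x :: rest =>
          have hrest : rest.length ≤ n := by
            simpa using Nat.succ_le_succ_iff.mp hlen
          obtain ⟨ih1, ih2⟩ := ih rest hrest
          constructor
          · -- pvALoop (x :: rest) 0 = pvBMain (x :: rest)
            by_cases hodd : x % 2 = 1
            · -- x odd: A continues with count 1; B consumes the run
              have hA : pvALoop (x :: rest) 0 = pvALoop rest 1 := by
                simp [pvALoop, hodd]
              rw [hA, ih2 1 (by norm_num) (by norm_num)]
              conv_rhs => rw [pvBMain]
              simp [hodd]
            · have hA : pvALoop (x :: rest) 0 = pvALoop rest 0 := by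
                simp [pvALoop, hodd]
              rw [hA, ih1]
              conv_rhs => rw [pvBMain]
              simp [hodd]
          · -- the run invariant at x :: rest
            intro k h1 h2
            by_cases hodd : x % 2 = 1
            · by_cases hk : k = 2
              · -- count reaches 3: A returns true; B's run length is ≥ 3
                subst hk
                have hA : pvALoop (x :: rest) 2 = true := by
                  simp [pvALoop, hodd]
                have hge : (3:Int) ≤ (pvBSkip (x :: rest) 2).1 := by
                  have h3 : pvBSkip (x :: rest) 2 = pvBSkip rest 3 := by
                    simp [pvBSkip, hodd]
                  rw [h3]; exact pvBSkip_fst_ge rest 3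
                simp [hA, hge]
              · -- k = 1: both advance inside the run
                have hk1 : k = 1 := by omega
                subst hk1
                have hA : pvALoop (x :: rest) 1 = pvALoop rest 2 := by
                  simp [pvALoop, hodd]
                have hB : pvBSkip (x :: rest) 1 = pvBSkip rest 2 := by
                  simp [pvBSkip, hodd]
                rw [hA, hB, ih2 2 (by norm_num) (by norm_num)]
            · -- x even: A resets to 0; B ends the run (length k ≤ 2 < 3) and continues after x
              have hA : pvALoop (x :: rest) k = pvALoop rest 0 := by
                simp [pvALoop, hodd]
              have hB : pvBSkip (x :: rest) k = (k, rest) := by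
                simp [pvBSkip, hodd]
              have h3 : ¬ ((3:Int) ≤ k) := by omega
              rw [hA, hB, ih1]
              simp [h3]

-- ===== VERDICT (by name: the statement is the Claim_ definition above) =====
theorem tres_impares_consecutivos_spec : Claim_equal_tres_impares_consecutivos := by
  intro array _
  unfold Spec_tres_impares_consecutivos tres_impares_consecutivos tres_impares_consecutivos_alt
  exact (pvAB_key array.length array (le_refl _)).1
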